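-- pv_equiv track=rewrite | github.com/kesyog/adventofcode2020 | day24/p24.py | flip_tile
-- ===== SOURCE A (Python) =====
-- def flip_tile(grid, d):
--     x, y = 0, 0
--     for direction in d:
--         if direction == "e":
--             x += 1
--             continue
--         if direction == "w":
--             x -= 1
--             continue
--         if "n" in direction:
--             y += 1
--             if "w" in direction:
--                 x -= 1
--         elif "s" in direction:
--             y -= 1
--             if "e" in direction:
--                 x += 1
--     if grid[(x, y)] == True:
--         del grid[(x, y)]
--     else:
--         grid[(x, y)] = True
--
--     return grid
-- ===== SOURCE B (Python) =====
-- def _delta(t):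
--     if t == "e":
--         return (1, 0)
--     if t == "w":
--         return (-1, 0)
--     if "n" in t:
--         return ((-1 if "w" in t else 0), 1)
--     if "s" in t:
--         return ((1 if "e" in t else 0), -1)
--     return (0, 0)
--
--
-- def flip_tile(grid, d):
--     # Tally the direction tokens once, then add count * delta per distinct token.
--     tally = {}
--     for t in d:
--         tally[t] = tally.get(t, 0) + 1
--     x, y = 0, 0
--     for t, c in tally.items():
--         dx, dy = _delta(t)
--         x += c * dx
--         y += c * dy
--     key = (x, y)
--     if grid[key] == True:
--         del grid[key]
--     else:
--         grid[key] = True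
--     return grid
-- ===== Notes on version B (the rewrite author's own statement) =====
-- stated objective: alternative
-- what changed: B replaces A's per-token coordinate loop by a frequency tally of the tokens followed by one pass over the distinct token/count pairs adding count*delta; the final toggle on the grid dict is unchanged.
import Mathlib
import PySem

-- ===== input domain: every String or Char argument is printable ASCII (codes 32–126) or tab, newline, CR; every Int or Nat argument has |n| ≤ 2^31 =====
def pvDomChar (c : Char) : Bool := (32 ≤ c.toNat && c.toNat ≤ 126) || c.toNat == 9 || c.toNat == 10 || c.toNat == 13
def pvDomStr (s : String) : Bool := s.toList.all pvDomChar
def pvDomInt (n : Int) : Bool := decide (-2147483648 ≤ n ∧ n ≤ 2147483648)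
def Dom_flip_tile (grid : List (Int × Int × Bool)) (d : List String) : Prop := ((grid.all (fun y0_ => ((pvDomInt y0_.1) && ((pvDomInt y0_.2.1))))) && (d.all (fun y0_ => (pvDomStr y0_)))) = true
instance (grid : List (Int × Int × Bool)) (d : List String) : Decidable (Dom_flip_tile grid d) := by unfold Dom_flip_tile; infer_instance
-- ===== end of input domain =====

-- B replaces A's per-token coordinate loop by a token tally followed by one pass over distinct
-- token/count pairs (count*delta); both Pythons mutate grid in place, the claim is about the return value.


-- Shared transliterations of the Python dict operations on the flattened (x, y, value) entries:
-- first-match lookup (grid[key] / grid.get(key)), first-match delete (del grid[key]),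
-- in-place overwrite-or-append set (grid[key] = True).
def pvLookup : List (Int × Int × Bool) → Int × Int → Option Bool
  | [], _ => none
  | (a, b, v) :: rest, k => if (a, b) = k then some v else pvLookup rest k

def pvDel : List (Int × Int × Bool) → Int × Int → List (Int × Int × Bool)
  | [], _ => []
  | (a, b, v) :: rest, k => if (a, b) = k then rest else (a, b, v) :: pvDel rest k

def pvSet : List (Int × Int × Bool) → Int × Int → List (Int × Int × Bool)
  | [], k => [(k.1, k.2, true)]
  | (a, b, v) :: rest, k => if (a, b) = k then (a, b, true) :: rest else (a, b, v) :: pvSet rest k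

-- ===== PORT A =====
-- A's loop body: the if/continue/elif chain, branch for branch.
def pvAStep (p : Int × Int) (direction : String) : Int × Int :=
  if direction = "e" then (p.1 + 1, p.2)
  else if direction = "w" then (p.1 - 1, p.2)
  else if PySem.Str.isIn "n" direction then
    (if PySem.Str.isIn "w" direction then p.1 - 1 else p.1, p.2 + 1)
  else if PySem.Str.isIn "s" direction then
    (if PySem.Str.isIn "e" direction then p.1 + 1 else p.1, p.2 - 1)
  else p

def flip_tile (grid : List (Int × Int × Bool)) (d : List String) : List (Int × Int × Bool) :=
  let p := d.foldl pvAStep (0, 0)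
  match pvLookup grid p with
  | some true => pvDel grid p
  | some false => pvSet grid p
  | none => grid   -- Python raises KeyError here; excluded by Pre_flip_tile

-- ===== PORT B =====
def tileDelta (t : String) : Int × Int :=
  if t = "e" then (1, 0)
  else if t = "w" then (-1, 0)
  else if PySem.Str.isIn "n" t then ((if PySem.Str.isIn "w" t then -1 else 0), 1)
  else if PySem.Str.isIn "s" t then ((if PySem.Str.isIn "e" t then 1 else 0), -1)
  else (0, 0)

def flip_tile_alt (grid : List (Int × Int × Bool)) (d : List String) : List (Int × Int × Bool) :=
  let tally := d.foldl (fun (acc : PySem.Dict String Int) t => acc.insert t (acc.getD t 0 + 1)) PySem.Dict.empty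
  let p := tally.items.foldl
    (fun (q : Int × Int) kv => (q.1 + kv.2 * (tileDelta kv.1).1, q.2 + kv.2 * (tileDelta kv.1).2)) (0, 0)
  match pvLookup grid p with
  | some true => pvDel grid p
  | _ => pvSet grid p   -- the none case is unreachable under Pre_flip_tile (Python raises KeyError there)

-- ===== PRECONDITION & SPEC =====
def pvTarget (d : List String) : Int × Int :=
  ((d.map (fun t => (tileDelta t).1)).sum, (d.map (fun t => (tileDelta t).2)).sum)

-- Pre_ excludes exactly the inputs on which A raises KeyError: the tile key reached by d is absent from grid.
def Pre_flip_tile (grid : List (Int × Int × Bool)) (d : List String) : Prop :=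
  pvTarget d ∈ grid.map (fun e => (e.1, e.2.1))
instance (grid : List (Int × Int × Bool)) (d : List String) : Decidable (Pre_flip_tile grid d) := by unfold Pre_flip_tile; infer_instance

def pvWitness_flip_tile : (List (Int × Int × Bool)) × List String := ([(0, 0, true)], [])

def Spec_flip_tile (grid : List (Int × Int × Bool)) (d : List String) (out : List (Int × Int × Bool)) : Prop := out = flip_tile_alt grid d
instance (grid : List (Int × Int × Bool)) (d : List String) (out : List (Int × Int × Bool)) : Decidable (Spec_flip_tile grid d out) := by unfold Spec_flip_tile; infer_instance

-- ===== CLAIM (what is proved, stated in full; the proofs are below) =====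
def Claim_equal_flip_tile : Prop := ∀ (grid : List (Int × Int × Bool)) (d : List String), Dom_flip_tile grid d → Pre_flip_tile grid d → Spec_flip_tile grid d (flip_tile grid d)

-- ===== LEMMAS AND PROOFS =====
theorem pvAStep_eq (p : Int × Int) (t : String) :
    pvAStep p t = (p.1 + (tileDelta t).1, p.2 + (tileDelta t).2) := by
  unfold pvAStep tileDelta
  split_ifs <;> simp <;> ring

theorem foldl_pvAStep (d : List String) : ∀ p : Int × Int,
    d.foldl pvAStep p = (p.1 + (pvTarget d).1, p.2 + (pvTarget d).2) := by
  induction d with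
  | nil => intro p; simp [pvTarget]
  | cons t ds ih =>
    intro p
    simp only [List.foldl_cons, ih, pvAStep_eq, pvTarget, List.map_cons, List.sum_cons,
      Prod.mk.injEq]
    constructor <;> ring

theorem foldl_bstep (l : List (String × Int)) : ∀ q : Int × Int,
    l.foldl (fun (q : Int × Int) kv => (q.1 + kv.2 * (tileDelta kv.1).1, q.2 + kv.2 * (tileDelta kv.1).2)) q
      = (q.1 + (l.map (fun kv => kv.2 * (tileDelta kv.1).1)).sum,
         q.2 + (l.map (fun kv => kv.2 * (tileDelta kv.1).2)).sum) := by
  induction l with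
  | nil => intro q; simp
  | cons kv l ih =>
    intro q
    simp only [List.foldl_cons, ih, List.map_cons, List.sum_cons, Prod.mk.injEq]
    constructor <;> ring

theorem sum_count_mul (d : List String) (f : String → Int) :
    ((PySem.Set.ofList d).map (fun k => (d.count k : Int) * f k)).sum = (d.map f).sum := by
  rw [← List.sum_toFinset _ (PySem.Set.nodup_ofList d)]
  have hfs : (PySem.Set.ofList d).toFinset = d.toFinset := by
    apply Finset.ext
    intro x
    simp [List.mem_toFinset, PySem.Set.mem_ofList]
  rw [hfs, Finset.sum_list_map_count d f]
  apply Finset.sum_congr rfl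
  intro x _
  simp

theorem alt_target (d : List String) :
    ((d.foldl (fun (acc : PySem.Dict String Int) t => acc.insert t (acc.getD t 0 + 1)) PySem.Dict.empty).items.foldl
      (fun (q : Int × Int) kv => (q.1 + kv.2 * (tileDelta kv.1).1, q.2 + kv.2 * (tileDelta kv.1).2)) (0, 0))
      = pvTarget d := by
  rw [PySem.Dict.foldl_insert_getD_add_one_eq_counter, PySem.Dict.items_counter, foldl_bstep]
  simp only [List.map_map, Function.comp_def, pvTarget, zero_add, Prod.mk.injEq]
  exact ⟨sum_count_mul d _, sum_count_mul d _⟩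

theorem pvLookup_none_iff (g : List (Int × Int × Bool)) (k : Int × Int) :
    pvLookup g k = none ↔ k ∉ g.map (fun e => (e.1, e.2.1)) := by
  induction g with
  | nil => simp [pvLookup]
  | cons e rest ih =>
    obtain ⟨a, b, v⟩ := e
    simp only [pvLookup, List.map_cons, List.mem_cons]
    by_cases h : (a, b) = k
    · simp [h]
    · have h' : ¬ k = (a, b) := fun hh => h hh.symm
      rw [if_neg h, ih]
      simp [h']

-- ===== VERDICT (by name: the statement is the Claim_ definition above) =====
theorem flip_tile_spec : Claim_equal_flip_tile := by
  intro grid d _ hpre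
  unfold Spec_flip_tile flip_tile flip_tile_alt
  simp only [foldl_pvAStep, alt_target, zero_add, Prod.mk.eta]
  cases hv : pvLookup grid (pvTarget d) with
  | none => exact absurd hpre ((pvLookup_none_iff grid (pvTarget d)).mp hv)
  | some b => cases b <;> rfl
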